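-- pv_equiv track=rewrite | github.com/0xhunterkiller/Image-Encryption | str-file/dna.py | revMoore
-- ===== SOURCE A (Python) =====
-- def revMoore(DCR,dna): # Enter a DNA Sequence
--     rnd = DCR%4
--     stateOutIn = {"A":rnd,"T":(rnd+1)%4,"C":(rnd+2)%4,"G":(rnd+3)%4}
--     rttable = {
--         0:{(rnd+1)%4:"G",(rnd+2)%4:"A",rnd:"C",(rnd+3)%4:"T"},
--         1:{rnd:"G",(rnd+1)%4:"A",(rnd+3)%4:"C",(rnd+2)%4:"T"},
--         2:{(rnd+2)%4:"G",(rnd+3)%4:"A",(rnd+1)%4:"C",rnd:"T"},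
--         3:{(rnd+3)%4:"G",rnd:"A",(rnd+2)%4:"C",(rnd+1)%4:"T"}
--     }
--     state = rnd
--     ndna = ""
--     for i in range(len(dna)):
--         fstate = stateOutIn[dna[i]]
--         ndna += rttable[state][fstate]
--         state = fstate
--     return ndna # Returns a different DNA Sequence
-- ===== SOURCE B (Python) =====
-- def revMoore(DCR, dna):
--     rnd = DCR % 4
--     rows = {0: "CGAT", 1: "GATC", 2: "TCGA", 3: "ATCG"}
--     # One whole-string translation per possible previous base, then a selection pass.
--     full = {p: dna.translate(str.maketrans("ATCG", rows[(rnd + i) % 4]))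
--             for i, p in enumerate("ATCG")}
--     prevs = ("A" + dna)[:-1]
--     return "".join(full[p][i] for i, p in enumerate(prevs))
-- ===== Notes on version B (the rewrite author's own statement) =====
-- stated objective: alternative
-- what changed: Instead of A's sequential Moore-state loop with three runtime-built dicts, B precomputes four whole-string translations of the input via str.maketrans/str.translate (one per possible previous base) and then assembles the output in a second pass by selecting, at each position, the character from the translation indexed by the previous base.
import Mathlib
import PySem

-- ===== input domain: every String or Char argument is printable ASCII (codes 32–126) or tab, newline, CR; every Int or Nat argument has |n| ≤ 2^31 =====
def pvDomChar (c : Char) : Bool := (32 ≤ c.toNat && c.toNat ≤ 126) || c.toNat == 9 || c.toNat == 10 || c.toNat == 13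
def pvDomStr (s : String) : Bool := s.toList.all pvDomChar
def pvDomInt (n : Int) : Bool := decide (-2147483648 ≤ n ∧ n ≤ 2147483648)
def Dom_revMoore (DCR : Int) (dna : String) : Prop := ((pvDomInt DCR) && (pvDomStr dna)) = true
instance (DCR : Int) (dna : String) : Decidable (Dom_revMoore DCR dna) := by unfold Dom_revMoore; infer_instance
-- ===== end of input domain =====

-- B replaces A's threaded Moore-state loop + runtime-built dicts by four whole-string
-- translations (one per possible previous base) followed by a selection pass (alternative decomposition, same cost).


-- ===== PORT A =====
-- stateOutIn = {"A":rnd,"T":(rnd+1)%4,"C":(rnd+2)%4,"G":(rnd+3)%4}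
def pvSoi (rnd : Int) : PySem.Dict Char Int :=
  PySem.Dict.ofList
    [('A', rnd), ('T', PySem.Int.mod (rnd + 1) 4),
     ('C', PySem.Int.mod (rnd + 2) 4), ('G', PySem.Int.mod (rnd + 3) 4)]

-- rttable (dict of dicts, keys are the runtime values (rnd+k)%4 exactly as in A)
def pvRt (rnd : Int) : PySem.Dict Int (PySem.Dict Int Char) :=
  PySem.Dict.ofList
    [ (0, PySem.Dict.ofList [(PySem.Int.mod (rnd + 1) 4, 'G'), (PySem.Int.mod (rnd + 2) 4, 'A'),
                             (rnd, 'C'), (PySem.Int.mod (rnd + 3) 4, 'T')]),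
      (1, PySem.Dict.ofList [(rnd, 'G'), (PySem.Int.mod (rnd + 1) 4, 'A'),
                             (PySem.Int.mod (rnd + 3) 4, 'C'), (PySem.Int.mod (rnd + 2) 4, 'T')]),
      (2, PySem.Dict.ofList [(PySem.Int.mod (rnd + 2) 4, 'G'), (PySem.Int.mod (rnd + 3) 4, 'A'),
                             (PySem.Int.mod (rnd + 1) 4, 'C'), (rnd, 'T')]),
      (3, PySem.Dict.ofList [(PySem.Int.mod (rnd + 3) 4, 'G'), (rnd, 'A'),
                             (PySem.Int.mod (rnd + 2) 4, 'C'), (PySem.Int.mod (rnd + 1) 4, 'T')]) ]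

-- the for-loop of A, threading (state, ndna); dict lookups via get?/getD
-- (getD defaults are unreachable inside Pre_; in Python a miss is a KeyError, excluded by Pre_)
def revMooreLoop (soi : PySem.Dict Char Int) (rt : PySem.Dict Int (PySem.Dict Int Char)) :
    List Char → Int → List Char → List Char
  | [], _, ndna => ndna
  | c :: rest, state, ndna =>
    let fstate := (soi.get? c).getD 0
    let ch := (((rt.get? state).getD PySem.Dict.empty).get? fstate).getD 'X'
    revMooreLoop soi rt rest fstate (ndna ++ [ch])

def revMoore (DCR : Int) (dna : String) : String :=
  let rnd := PySem.Int.mod DCR 4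
  String.mk (revMooreLoop (pvSoi rnd) (pvRt rnd) dna.toList rnd [])

-- ===== PORT B =====
-- rows = {0:"CGAT",1:"GATC",2:"TCGA",3:"ATCG"}
def bRows : PySem.Dict Int (List Char) :=
  PySem.Dict.ofList
    [(0, ['C','G','A','T']), (1, ['G','A','T','C']),
     (2, ['T','C','G','A']), (3, ['A','T','C','G'])]

-- str.maketrans("ATCG", row) + translate applied to one character: unknown chars pass through
def bTr (row : List Char) (c : Char) : Char :=
  match PySem.List.index? ['A','T','C','G'] c with
  | some i => (PySem.List.pyGet? row (i : Int)).getD c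
  | none => c

-- dna.translate(table) : per-character map over the string
def bTranslate (row : List Char) (cs : List Char) : List Char := cs.map (bTr row)

def revMoore_alt (DCR : Int) (dna : String) : String :=
  let rnd := PySem.Int.mod DCR 4
  let cs := dna.toList
  let full : PySem.Dict Char (List Char) :=
    PySem.Dict.ofList ((PySem.List.enumerate ['A','T','C','G'] 0).map
      (fun ip => (ip.2, bTranslate ((bRows.get? (PySem.Int.mod (rnd + ip.1) 4)).getD []) cs)))
  let prevs := ('A' :: cs).dropLast          -- ("A" + dna)[:-1]
  String.mk ((PySem.List.enumerate prevs 0).map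
    (fun ip => (PySem.List.pyGet? ((full.get? ip.2).getD []) ip.1).getD '?'))

-- ===== PRECONDITION & SPEC =====
-- Pre_ excludes exactly the strings containing a character outside "ATCG", on which A raises KeyError.
def Pre_revMoore (DCR : Int) (dna : String) : Prop :=
  (dna.toList.all (fun c => decide (c = 'A' ∨ c = 'T' ∨ c = 'C' ∨ c = 'G'))) = true
instance (DCR : Int) (dna : String) : Decidable (Pre_revMoore DCR dna) := by
  unfold Pre_revMoore; infer_instance

def pvWitness_revMoore : Int × String := (5, "GATTACA")

def Spec_revMoore (DCR : Int) (dna : String) (out : String) : Prop := out = revMoore_alt DCR dna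
instance (DCR : Int) (dna : String) (out : String) : Decidable (Spec_revMoore DCR dna out) := by
  unfold Spec_revMoore; infer_instance

-- ===== CLAIM =====
def Claim_equal_revMoore : Prop := ∀ (DCR : Int) (dna : String), Dom_revMoore DCR dna → Pre_revMoore DCR dna → Spec_revMoore DCR dna (revMoore DCR dna)

-- ===== LEMMAS AND PROOFS =====

-- the per-pair output character, as B computes it (previous base p, current base c)
def pvI : Char → Int
  | 'T' => 1 | 'C' => 2 | 'G' => 3 | _ => 0

def pvG (r : Int) (p c : Char) : Char :=
  bTr ((bRows.get? (PySem.Int.mod (r + pvI p) 4)).getD []) c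

-- pairwise recursion both sides are reduced to
def pvH (r : Int) : Char → List Char → List Char
  | _, [] => []
  | p, c :: rest => pvG r p c :: pvH r c rest

def pvATCG (c : Char) : Prop := c = 'A' ∨ c = 'T' ∨ c = 'C' ∨ c = 'G'

-- ---- A side ----
lemma pvFstate_eq (r : Int) (hr : r = 0 ∨ r = 1 ∨ r = 2 ∨ r = 3)
    (c : Char) (hc : pvATCG c) :
    (((pvSoi r).get? c).getD 0) = PySem.Int.mod (r + pvI c) 4 := by
  rcases hr with rfl | rfl | rfl | rfl <;> rcases hc with rfl | rfl | rfl | rfl <;> decide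

lemma pvCh_eq (r : Int) (hr : r = 0 ∨ r = 1 ∨ r = 2 ∨ r = 3)
    (p : Char) (hp : pvATCG p) (c : Char) (hc : pvATCG c) :
    ((((pvRt r).get? (PySem.Int.mod (r + pvI p) 4)).getD PySem.Dict.empty).get?
        (PySem.Int.mod (r + pvI c) 4)).getD 'X' = pvG r p c := by
  rcases hr with rfl | rfl | rfl | rfl <;> rcases hp with rfl | rfl | rfl | rfl <;>
    rcases hc with rfl | rfl | rfl | rfl <;> decide

lemma pvLoop_eq_pvH (r : Int) (hr : r = 0 ∨ r = 1 ∨ r = 2 ∨ r = 3) :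
    ∀ (cs : List Char), (∀ c ∈ cs, pvATCG c) →
    ∀ (p : Char), pvATCG p → ∀ (nd : List Char),
      revMooreLoop (pvSoi r) (pvRt r) cs (PySem.Int.mod (r + pvI p) 4) nd
        = nd ++ pvH r p cs := by
  intro cs
  induction cs with
  | nil => intro _ p _ nd; simp [revMooreLoop, pvH]
  | cons c rest ih =>
    intro h p hp nd
    have hc := h c (List.mem_cons_self)
    have hrest : ∀ x ∈ rest, pvATCG x := fun x hx => h x (List.mem_cons_of_mem _ hx)
    simp only [revMooreLoop]
    rw [pvFstate_eq r hr c hc, pvCh_eq r hr p hp c hc, ih hrest c hc]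
    simp [pvH]

-- rnd = DCR % 4 lies in {0,1,2,3}
lemma pvRnd_mem (DCR : Int) :
    PySem.Int.mod DCR 4 = 0 ∨ PySem.Int.mod DCR 4 = 1 ∨
    PySem.Int.mod DCR 4 = 2 ∨ PySem.Int.mod DCR 4 = 3 := by
  have h1 := PySem.Int.mod_nonneg DCR (b := 4) (by norm_num)
  have h2 := PySem.Int.mod_lt DCR (b := 4) (by norm_num)
  omega

lemma pvInitState (r : Int) (hr : r = 0 ∨ r = 1 ∨ r = 2 ∨ r = 3) :
    r = PySem.Int.mod (r + pvI 'A') 4 := by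
  rcases hr with rfl | rfl | rfl | rfl <;> decide

-- ---- B side ----
-- the translated-strings dict, looked up at a valid base
lemma pvFull_get (r : Int) (cs : List Char) (p : Char) (hp : pvATCG p) :
    (PySem.Dict.ofList ((PySem.List.enumerate ['A','T','C','G'] 0).map
        (fun ip => (ip.2, bTranslate ((bRows.get? (PySem.Int.mod (r + ip.1) 4)).getD []) cs)))).get? p
      = some (cs.map (bTr ((bRows.get? (PySem.Int.mod (r + pvI p) 4)).getD []))) := by
  rcases hp with rfl | rfl | rfl | rfl <;>
    simp [PySem.List.enumerate, PySem.Dict.ofList, PySem.Dict.update, List.foldl,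
      PySem.Dict.get?_insert, bTranslate, pvI]

-- B's enumerate/select pass equals zipWith of pvG over (prevs, cs)
lemma pvSel_eq_zipWith (r : Int) (cs : List Char) (h : ∀ c ∈ cs, pvATCG c) :
    ((PySem.List.enumerate (('A' :: cs).dropLast) 0).map
      (fun ip => (PySem.List.pyGet?
          (((PySem.Dict.ofList ((PySem.List.enumerate ['A','T','C','G'] 0).map
              (fun jp => (jp.2, bTranslate ((bRows.get? (PySem.Int.mod (r + jp.1) 4)).getD []) cs)))).get? ip.2).getD [])
          ip.1).getD '?'))
      = List.zipWith (pvG r) (('A' :: cs).dropLast) cs := by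
  refine List.ext_getElem ?_ ?_
  · simp
  · intro k h1 h2
    have hk : k < cs.length := by
      simpa using h2
    have hkp : k < ('A' :: cs).dropLast.length := by
      simpa using hk
    simp only [List.getElem_map, PySem.List.getElem_enumerate, List.getElem_zipWith]
    have hp : pvATCG ((('A' :: cs).dropLast)[k]'hkp) := by
      have hm : (('A' :: cs).dropLast)[k]'hkp ∈ ('A' :: cs).dropLast := List.getElem_mem hkp
      rcases List.mem_cons.mp (List.mem_of_mem_dropLast hm) with h' | h'
      · exact Or.inl h'
      · exact h _ h'
    rw [pvFull_get r cs _ hp]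
    simp [hk, pvG]

lemma pvZipWith_eq_pvH (r : Int) :
    ∀ (cs : List Char) (p : Char),
      List.zipWith (pvG r) ((p :: cs).dropLast) cs = pvH r p cs := by
  intro cs
  induction cs with
  | nil => intro p; rfl
  | cons c rest ih =>
    intro p
    cases rest with
    | nil => rfl
    | cons d t =>
      have h := ih c
      simp only [List.dropLast_cons₂, List.zipWith_cons_cons] at h ⊢
      rw [h]
      rfl

-- ===== VERDICT =====
theorem revMoore_spec : Claim_equal_revMoore := by
  intro DCR dna _ hpre
  have hall : ∀ c ∈ dna.toList, pvATCG c := by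
    intro c hc
    have := (List.all_eq_true.mp hpre) c hc
    simpa [pvATCG] using this
  show revMoore DCR dna = revMoore_alt DCR dna
  simp only [revMoore, revMoore_alt]
  have hr := pvRnd_mem DCR
  have hA := pvLoop_eq_pvH (PySem.Int.mod DCR 4) hr dna.toList hall 'A' (Or.inl rfl) []
  rw [← pvInitState _ hr] at hA
  rw [pvSel_eq_zipWith _ _ hall, pvZipWith_eq_pvH, hA]
  simp
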